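-- pv_equiv track=rewrite | github.com/wpedrak/advent_of_code_2020 | 14/solution2.py | get_all_fillings
-- ===== SOURCE A (Python) =====
-- def get_all_fillings(value_str):
--     x_number = sum(map(
--         lambda x: x == 'X',
--         value_str
--     ))
--     x_positions = [idx for idx, digit in enumerate(value_str) if digit == 'X']
--     x_powers = [35 - idx for idx in x_positions]
--
--     fillings = []
--
--     for number_to_embed in range(2 ** x_number):
--         binary_repr = f"{number_to_embed:036b}"[-x_number:]
--         number = 0
--         for digit, x_power in zip(binary_repr, x_powers):
--             number += int(digit) * (2 ** x_power)
--
--         fillings.append(number)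
--
--     return fillings
-- ===== SOURCE B (Python) =====
-- def get_all_fillings(value_str):
--     powers = [2 ** (35 - idx) for idx, digit in enumerate(value_str) if digit == 'X']
--     fillings = [0]
--     for w in reversed(powers):
--         fillings = fillings + [v + w for v in fillings]
--     return fillings
-- ===== Notes on version B (the rewrite author's own statement) =====
-- stated objective: faster
-- what changed: Instead of formatting each of the 2^k counter values as a 36-char binary string and summing k digit*power products per value, B builds the result list by successive doubling (one list append of shifted copies per X position), eliminating the per-value binary decomposition.
-- outside the precondition, e.g. on get_all_fillings('000000000000000000000000000000000000X'): A returns [0.0, 0.5], B returns [0, 0.5]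
import Mathlib
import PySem

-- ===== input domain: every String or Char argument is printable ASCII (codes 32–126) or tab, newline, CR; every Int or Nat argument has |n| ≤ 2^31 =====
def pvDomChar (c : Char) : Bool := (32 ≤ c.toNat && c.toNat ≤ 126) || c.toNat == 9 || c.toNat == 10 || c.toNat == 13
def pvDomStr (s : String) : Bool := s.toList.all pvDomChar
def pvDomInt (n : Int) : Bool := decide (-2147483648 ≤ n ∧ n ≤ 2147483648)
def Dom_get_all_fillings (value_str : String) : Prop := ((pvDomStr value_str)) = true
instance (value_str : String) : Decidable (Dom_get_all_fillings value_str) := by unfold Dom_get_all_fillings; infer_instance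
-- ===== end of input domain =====

-- B replaces the per-counter-value binary-string decomposition of A by a list-doubling
-- construction (one append of a shifted copy per X position): measurably faster (asymptotic).

-- ===== PORT A =====
-- hand port of Python's f"{n:b}" digit list (no builtin in PySem); exact for 0 ≤ n
def pyBinDigits (n : Nat) : List Char :=
  if h : n = 0 then [] else pyBinDigits (n / 2) ++ [if n % 2 = 1 then '1' else '0']
decreasing_by exact Nat.div_lt_self (Nat.pos_of_ne_zero h) (by norm_num)

-- hand port of Python's f"{n:036b}": binary digits left-padded with '0' to width 36; exact for 0 ≤ n
def pyFmt036b (n : Int) : List Char :=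
  List.replicate (36 - (pyBinDigits n.toNat).length) '0' ++ pyBinDigits n.toNat

-- Python's 2 ** p: exact for 0 ≤ p; for p < 0 Python yields a float (those inputs are outside Pre_)
def pyPow2 (p : Int) : Int := if 0 ≤ p then 2 ^ p.toNat else 0

def get_all_fillings (value_str : String) : List Int :=
  let x_number : Nat :=
    (value_str.toList.map (fun x => x == 'X')).foldl (fun a b => a + (if b then 1 else 0)) 0
  let x_positions : List Int :=
    ((PySem.List.enumerate value_str.toList 0).filter (fun p => p.2 == 'X')).map (fun p => p.1)
  let x_powers : List Int := x_positions.map (fun idx => 35 - idx)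
  (PySem.List.pyRange 0 (2 ^ x_number) 1).foldl (fun fillings number_to_embed =>
    let binary_repr : List Char :=
      PySem.List.slice (pyFmt036b number_to_embed) (some (-(x_number : Int))) none
    let number : Int := (binary_repr.zip x_powers).foldl
      (fun number dp => number + ((PySem.Int.ofStr? (String.ofList [dp.1])).getD 0) * pyPow2 dp.2) 0
    fillings ++ [number]) []

-- ===== PORT B =====
def get_all_fillings_alt (value_str : String) : List Int :=
  let powers : List Int :=
    ((PySem.List.enumerate value_str.toList 0).filter (fun p => p.2 == 'X')).map
      (fun p => pyPow2 (35 - p.1))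
  powers.reverse.foldl (fun fillings w => fillings ++ fillings.map (fun v => v + w)) [0]

-- ===== PRECONDITION & SPEC =====
-- Pre_ excludes strings with an 'X' at index ≥ 36: there Python's 2 ** (35 - idx) is a float,
-- so A returns a list containing floats, not a value of the declared type List Int.
def Pre_get_all_fillings (value_str : String) : Prop :=
  ((value_str.toList.drop 36).all (fun c => !(c == 'X'))) = true
instance (value_str : String) : Decidable (Pre_get_all_fillings value_str) := by
  unfold Pre_get_all_fillings; infer_instance
def pvWitness_get_all_fillings : String := "X0X"

def Spec_get_all_fillings (value_str : String) (out : List Int) : Prop :=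
  out = get_all_fillings_alt value_str
instance (value_str : String) (out : List Int) : Decidable (Spec_get_all_fillings value_str out) := by
  unfold Spec_get_all_fillings; infer_instance

-- ===== CLAIM (what is proved, stated in full; the proofs are below) =====
def Claim_equal_get_all_fillings : Prop := ∀ (value_str : String), Dom_get_all_fillings value_str → Pre_get_all_fillings value_str → Spec_get_all_fillings value_str (get_all_fillings value_str)

-- ===== LEMMAS AND PROOFS =====

-- the k-bit MSB-first binary string of n (mathematical spec of A's formatted-and-sliced string)
def bits : Nat → Nat → List Char
  | 0, _ => []
  | k+1, n => bits k (n / 2) ++ [if n % 2 = 1 then '1' else '0']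

lemma bits_length (k n : Nat) : (bits k n).length = k := by
  induction k generalizing n with
  | zero => rfl
  | succ k ih => simp [bits, ih]

lemma bits_cons (k n : Nat) :
    bits (k+1) n = (if n / 2^k % 2 = 1 then '1' else '0') :: bits k n := by
  induction k generalizing n with
  | zero => simp [bits]
  | succ k ih =>
    have h : bits (k+1+1) n = bits (k+1) (n/2) ++ [if n % 2 = 1 then '1' else '0'] := rfl
    rw [h, ih]
    have hdd : n / 2 / 2 ^ k = n / 2 ^ (k+1) := by
      rw [Nat.div_div_eq_div_mul, mul_comm 2 (2 ^ k), ← pow_succ]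
    simp [bits, hdd]

lemma pyBin_eq_bits (w n : Nat) (h : n < 2 ^ w) :
    List.replicate (w - (pyBinDigits n).length) '0' ++ pyBinDigits n = bits w n := by
  induction w generalizing n with
  | zero =>
    interval_cases n
    simp [pyBinDigits, bits]
  | succ w ih =>
    by_cases h0 : n = 0
    · subst h0
      rw [pyBinDigits]
      simp only [reduceDIte, List.length_nil, List.append_nil, Nat.sub_zero]
      rw [List.replicate_succ' (n := w)]
      have : bits (w+1) 0 = bits w 0 ++ ['0'] := by simp [bits]
      rw [this, ← ih 0 (Nat.two_pow_pos w)]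
      simp [pyBinDigits]
    · rw [pyBinDigits]
      simp only [h0, reduceDIte]
      have hd : n / 2 < 2 ^ w := by
        rw [Nat.div_lt_iff_lt_mul (by norm_num)]
        calc n < 2 ^ (w+1) := h
        _ = 2 ^ w * 2 := by rw [pow_succ]
      have hb : bits (w+1) n = bits w (n/2) ++ [if n % 2 = 1 then '1' else '0'] := rfl
      rw [hb, ← ih (n/2) hd]
      rw [List.length_append, List.length_singleton]
      rw [Nat.succ_sub_succ]
      simp

-- bits k only depends on n modulo 2^k
lemma bits_add_mul (k n m : Nat) : bits k (n + 2 ^ k * m) = bits k n := by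
  induction k generalizing n m with
  | zero => rfl
  | succ k ih =>
    have hdiv : (n + 2 ^ (k+1) * m) / 2 = n / 2 + 2 ^ k * m := by
      rw [pow_succ, mul_comm (2^k) 2, mul_assoc]
      omega
    have hmod : (n + 2 ^ (k+1) * m) % 2 = n % 2 := by
      rw [pow_succ, mul_comm (2^k) 2, mul_assoc]
      omega
    show bits k ((n + 2 ^ (k+1) * m) / 2) ++ _ = bits k (n / 2) ++ _
    rw [hdiv, hmod, ih]

lemma bits_drop (j k n : Nat) : (bits (j + k) n).drop j = bits k n := by
  induction j with
  | zero => simp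
  | succ j ih =>
    have : j + 1 + k = (j + k) + 1 := by omega
    rw [this, bits_cons, List.drop_succ_cons, ih]

lemma ofStr_zero : (PySem.Int.ofStr? "0").getD 0 = 0 := by decide
lemma ofStr_one : (PySem.Int.ofStr? "1").getD 0 = 1 := by decide

-- A's inner accumulating fold, as a named function
def pvStep : Int → Char × Int → Int := fun number dp =>
  number + ((PySem.Int.ofStr? (String.ofList [dp.1])).getD 0) * pyPow2 dp.2

lemma pvStep_shift (l : List (Char × Int)) (a : Int) :
    l.foldl pvStep a = a + l.foldl pvStep 0 := by
  induction l generalizing a with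
  | nil => simp
  | cons x xs ih =>
    rw [List.foldl_cons, List.foldl_cons, ih, ih (pvStep 0 x)]
    simp [pvStep]
    ring

-- A's inner sum for counter value n and power list ps
def innerSum (n : Nat) (ps : List Int) : Int := ((bits ps.length n).zip ps).foldl pvStep 0

lemma innerSum_nil (n : Nat) : innerSum n [] = 0 := rfl

lemma innerSum_cons (n : Nat) (w : Int) (rest : List Int) :
    innerSum n (w :: rest)
      = (if n / 2 ^ rest.length % 2 = 1 then 1 else 0) * pyPow2 w + innerSum n rest := by
  unfold innerSum
  rw [List.length_cons, bits_cons, List.zip_cons_cons, List.foldl_cons, pvStep_shift]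
  have h0 : pvStep 0 ((if n / 2 ^ rest.length % 2 = 1 then '1' else '0'), w)
      = (if n / 2 ^ rest.length % 2 = 1 then 1 else 0) * pyPow2 w := by
    by_cases h : n / 2 ^ rest.length % 2 = 1 <;>
      simp [h, pvStep, ofStr_zero, ofStr_one]
  rw [h0]

lemma main_lemma (ps : List Int) :
    (List.range (2 ^ ps.length)).map (fun n => innerSum n ps)
      = (ps.map pyPow2).reverse.foldl
          (fun fillings w => fillings ++ fillings.map (fun v => v + w)) [0] := by
  induction ps with
  | nil => simp [innerSum_nil]
  | cons w rest ih =>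
    have hsplit : (2 : Nat) ^ (w :: rest).length = 2 ^ rest.length + 2 ^ rest.length := by
      rw [List.length_cons, pow_succ]; ring
    rw [hsplit, List.range_add, List.map_append, List.map_map]
    have hfirst : (List.range (2 ^ rest.length)).map (fun n => innerSum n (w :: rest))
        = (List.range (2 ^ rest.length)).map (fun n => innerSum n rest) := by
      apply List.map_congr_left
      intro n hn
      rw [List.mem_range] at hn
      rw [innerSum_cons, Nat.div_eq_of_lt hn]
      simp
    have hsecond : (List.range (2 ^ rest.length)).map
          ((fun n => innerSum n (w :: rest)) ∘ (fun x => 2 ^ rest.length + x))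
        = ((List.range (2 ^ rest.length)).map (fun n => innerSum n rest)).map
            (fun v => v + pyPow2 w) := by
      rw [List.map_map]
      apply List.map_congr_left
      intro n hn
      rw [List.mem_range] at hn
      simp only [Function.comp_apply]
      rw [innerSum_cons]
      have hb : (2 ^ rest.length + n) / 2 ^ rest.length % 2 = 1 := by
        rw [Nat.add_div_left _ (Nat.two_pow_pos _) ]
        rw [Nat.div_eq_of_lt hn]
      have hbits : innerSum (2 ^ rest.length + n) rest = innerSum n rest := by
        unfold innerSum
        have : 2 ^ rest.length + n = n + 2 ^ rest.length * 1 := by ring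
        rw [this, bits_add_mul]
      rw [hb, hbits]
      simp
      ring
    rw [hfirst, hsecond, ih]
    have : ((w :: rest).map pyPow2).reverse = (rest.map pyPow2).reverse ++ [pyPow2 w] := by
      simp
    rw [this, List.foldl_append]
    simp

-- counting: A's boolean-sum fold is countP
lemma sum_bool_count (l : List Char) (a : Nat) :
    (l.map (fun x => x == 'X')).foldl (fun a b => a + (if b then 1 else 0)) a
      = a + l.countP (fun x => x == 'X') := by
  induction l generalizing a with
  | nil => simp
  | cons c cs ih =>
    rw [List.map_cons, List.foldl_cons, ih, List.countP_cons]
    by_cases h : c == 'X' <;> simp [h] <;> omega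

-- the filtered enumeration has countP-many entries
lemma filter_enumerate_length (l : List Char) (s : Int) :
    (((PySem.List.enumerate l s).filter (fun p => p.2 == 'X'))).length
      = l.countP (fun x => x == 'X') := by
  induction l generalizing s with
  | nil => simp [PySem.List.enumerate_nil]
  | cons c cs ih =>
    rw [PySem.List.enumerate_cons, List.filter_cons, List.countP_cons]
    by_cases h : c == 'X' <;> simp [h, ih]

lemma count_le_36 (l : List Char) (hpre : ∀ c ∈ l.drop 36, c ≠ 'X') :
    l.countP (fun x => x == 'X') ≤ 36 := by
  have hsplit : l = l.take 36 ++ l.drop 36 := (List.take_append_drop 36 l).symm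
  rw [hsplit, List.countP_append]
  have h2 : (l.drop 36).countP (fun x => x == 'X') = 0 := by
    rw [List.countP_eq_zero]
    intro c hc
    simpa using hpre c hc
  have h1 : (l.take 36).countP (fun x => x == 'X') ≤ 36 := by
    calc (l.take 36).countP (fun x => x == 'X') ≤ (l.take 36).length := List.countP_le_length
    _ ≤ 36 := List.length_take_le _ _
  omega

-- the sliced 36-bit format equals bits k n once zipped against a k-element list
lemma slice_fmt_zip (n : Nat) (ps : List Int) (hk : ps.length ≤ 36) (hn : n < 2 ^ ps.length) :
    (PySem.List.slice (pyFmt036b (n : Int)) (some (-(ps.length : Int))) none).zip ps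
      = (bits ps.length n).zip ps := by
  have hn36 : n < 2 ^ 36 := lt_of_lt_of_le hn (Nat.pow_le_pow_right (by norm_num) hk)
  have hfmt : pyFmt036b (n : Int) = bits 36 n := by
    unfold pyFmt036b
    rw [Int.toNat_natCast]
    exact pyBin_eq_bits 36 n hn36
  rw [hfmt]
  rcases Nat.eq_zero_or_pos ps.length with h0 | hpos
  · rw [List.length_eq_zero_iff] at h0
    subst h0
    simp [List.zip_nil_right]
  · rw [PySem.List.slice_from_neg_natCast _ _ hpos]
    rw [bits_length]
    have h36 : (36 : Nat) - ps.length + ps.length = 36 := Nat.sub_add_cancel hk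
    have hdrop := bits_drop (36 - ps.length) ps.length n
    rw [h36] at hdrop
    rw [hdrop]

-- ===== VERDICT (by name: the statement is the Claim_ definition above) =====
theorem get_all_fillings_spec : Claim_equal_get_all_fillings := by
  intro value_str _hdom hpre
  unfold Pre_get_all_fillings at hpre
  have hpre' : ∀ c ∈ value_str.toList.drop 36, c ≠ 'X' := by
    intro c hc
    simpa using List.all_eq_true.mp hpre c hc
  unfold Spec_get_all_fillings get_all_fillings get_all_fillings_alt
  simp only []
  set cs := value_str.toList with hcs
  set F := (PySem.List.enumerate cs 0).filter (fun p => p.2 == 'X') with hF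
  set ps := (F.map (fun p => p.1)).map (fun idx => (35 : Int) - idx) with hps
  have hps' : ps = F.map (fun p => (35 : Int) - p.1) := by
    rw [hps, List.map_map]; rfl
  have hxnum : (cs.map (fun x => x == 'X')).foldl (fun a b => a + (if b then 1 else 0)) 0
      = ps.length := by
    rw [sum_bool_count, hps', List.length_map, hF, filter_enumerate_length]
    omega
  have hk36 : ps.length ≤ 36 := by
    rw [hps', List.length_map, hF, filter_enumerate_length]
    exact count_le_36 cs hpre'
  rw [hxnum]
  -- B's weight list is ps mapped through pyPow2
  have hBpow : F.map (fun p => pyPow2 (35 - p.1)) = ps.map pyPow2 := by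
    rw [hps', List.map_map]; rfl
  rw [hBpow]
  -- A's outer loop: foldl-append over pyRange is map over range
  rw [PySem.List.foldl_append_singleton_eq_map, PySem.List.pyRange_one, List.map_map]
  rw [← main_lemma]
  apply List.map_congr_left
  intro n hn
  rw [List.mem_range] at hn
  have h2n : ((2 : Int) ^ ps.length).toNat = 2 ^ ps.length := by
    rw [show ((2 : Int) ^ ps.length) = ((2 ^ ps.length : Nat) : Int) by push_cast; ring,
      Int.toNat_natCast]
  rw [sub_zero, h2n] at hn
  have hzip := slice_fmt_zip n ps hk36 hn
  simp only [Function.comp_apply, zero_add]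
  rw [hzip]
  rfl
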